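-- pv_equiv track=rewrite | github.com/7-ZPUs/Docs | scripts/generate_tracing_table.py | get_all_reqs
-- ===== SOURCE A (Python) =====
-- def get_descendants(ucs, index):
--     """Get indices of all descendants of the UC at given index"""
--     parent_level = ucs[index][2]
--     descendants = []
--     for i in range(index + 1, len(ucs)):
--         if ucs[i][2] > parent_level:
--             descendants.append(i)
--         else:
--             break
--     return descendants
--
-- def get_all_reqs(ucs, index, label_to_reqs):
--     """Get all requirements for a UC including descendants"""
--     label = ucs[index][0]
--     reqs = set()
--     # Own requirements
--     if label in label_to_reqs:
--         reqs.update(label_to_reqs[label])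
--     # Descendant requirements
--     descendants = get_descendants(ucs, index)
--     for desc_idx in descendants:
--         desc_label = ucs[desc_idx][0]
--         if desc_label in label_to_reqs:
--             reqs.update(label_to_reqs[desc_label])
--     return reqs
-- ===== SOURCE B (Python) =====
-- def get_all_reqs(ucs, index, label_to_reqs):
--     """Get all requirements for a UC including descendants, by recursing child-by-child over the tree"""
--     reqs = set(label_to_reqs.get(ucs[index][0], ()))
--     parent_level = ucs[index][2]
--     n = len(ucs)
--     i = index + 1
--     while i < n and ucs[i][2] > parent_level:
--         child_level = ucs[i][2]
--         reqs |= get_all_reqs(ucs, i, label_to_reqs)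
--         i += 1
--         while i < n and ucs[i][2] > child_level:
--             i += 1
--     return reqs
-- ===== Notes on version B (the rewrite author's own statement) =====
-- stated objective: alternative
-- what changed: A gathers all descendant indices into a flat list with a helper and then unions their requirements in a second loop; B walks the UC tree recursively, recursing into each immediate subtree's root and skipping past that whole subtree before looking at the next one.
import Mathlib
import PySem

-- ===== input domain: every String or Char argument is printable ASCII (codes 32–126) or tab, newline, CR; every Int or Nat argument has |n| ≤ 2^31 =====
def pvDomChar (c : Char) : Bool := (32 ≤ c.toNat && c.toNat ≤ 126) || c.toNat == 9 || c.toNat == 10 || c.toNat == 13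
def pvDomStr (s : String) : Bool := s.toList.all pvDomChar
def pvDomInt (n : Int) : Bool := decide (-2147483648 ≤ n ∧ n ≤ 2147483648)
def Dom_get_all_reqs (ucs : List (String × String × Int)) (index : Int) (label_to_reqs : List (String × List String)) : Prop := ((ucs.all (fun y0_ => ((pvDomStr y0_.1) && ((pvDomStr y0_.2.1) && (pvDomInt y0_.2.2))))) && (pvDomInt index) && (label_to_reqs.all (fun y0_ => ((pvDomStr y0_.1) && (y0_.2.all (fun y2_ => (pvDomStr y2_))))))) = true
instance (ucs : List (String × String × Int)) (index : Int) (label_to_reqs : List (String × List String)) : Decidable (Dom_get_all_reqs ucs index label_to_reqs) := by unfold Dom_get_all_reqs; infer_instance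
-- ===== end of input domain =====

-- B replaces A's flat "collect all descendant indices, then union their requirements" with a
-- recursive child-by-child tree walk (recurse into each immediate subtree, then skip past it);
-- objective: alternative decomposition, same asymptotic cost.

-- ===== PORT A =====

-- loop body of get_descendants: 'for i in range(index+1, len(ucs)): if ucs[i][2] > parent_level: append i else: break'
def pvGdLoop (ucs : List (String × String × Int)) (parent_level : Int) : List Int → List Int
  | [] => []
  | i :: rest =>
    match PySem.List.pyGet? ucs i with
    | none => []  -- Python would raise IndexError here; unreachable under Pre_
    | some uc => if uc.2.2 > parent_level then i :: pvGdLoop ucs parent_level rest else []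

def get_descendants (ucs : List (String × String × Int)) (index : Int) : List Int :=
  match PySem.List.pyGet? ucs index with
  | none => []  -- Python raises IndexError; excluded by Pre_
  | some uc => pvGdLoop ucs uc.2.2 (PySem.List.pyRange (index + 1) (ucs.length : Int) 1)

def get_all_reqs (ucs : List (String × String × Int)) (index : Int) (label_to_reqs : List (String × List String)) : List String :=
  match PySem.List.pyGet? ucs index with
  | none => []  -- Python raises IndexError; excluded by Pre_
  | some uc =>
    let d := PySem.Dict.mk label_to_reqs
    let label := uc.1
    let reqs : PySem.Set String :=
      if d.contains label then PySem.Set.update PySem.Set.empty (d.getD label []) else PySem.Set.empty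
    let descendants := get_descendants ucs index
    descendants.foldl (fun reqs desc_idx =>
      match PySem.List.pyGet? ucs desc_idx with
      | none => reqs  -- unreachable under Pre_
      | some duc =>
        if d.contains duc.1 then PySem.Set.update reqs (d.getD duc.1 []) else reqs) reqs

-- ===== PORT B =====

-- ucs[i][2] as a total function (the default is never read on the indices B touches under Pre_)
def pvLvl (ucs : List (String × String × Int)) (i : Int) : Int :=
  ((PySem.List.pyGet? ucs i).getD ("", "", 0)).2.2

-- inner while of Source B ('while i < n and ucs[i][2] > child_level: i += 1'); the Nat argument is a
-- fuel guard making the loop structurally total, seeded large enough below to never run out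
def pvSkipGo (ucs : List (String × String × Int)) (child_level : Int) : Nat → Int → Int
  | 0, i => i
  | fuel + 1, i =>
    if i < (ucs.length : Int) ∧ pvLvl ucs i > child_level then pvSkipGo ucs child_level fuel (i + 1)
    else i

mutual
-- body of Source B's get_all_reqs; the fuel is a structural totality guard only
def pvAltGo (ucs : List (String × String × Int)) (label_to_reqs : List (String × List String)) : Nat → Int → List String
  | 0, _ => []  -- fuel exhausted: unreachable with the seed below
  | fuel + 1, index =>
    match PySem.List.pyGet? ucs index with
    | none => []  -- Python raises IndexError; excluded by Pre_
    | some uc =>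
      pvAltLoopGo ucs label_to_reqs fuel uc.2.2 (index + 1)
        (PySem.Set.ofList ((PySem.Dict.mk label_to_reqs).getD uc.1 []))

-- outer while of Source B
def pvAltLoopGo (ucs : List (String × String × Int)) (label_to_reqs : List (String × List String)) : Nat → Int → Int → PySem.Set String → List String
  | 0, _, _, reqs => reqs  -- fuel exhausted: unreachable with the seed below
  | fuel + 1, parent_level, i, reqs =>
    if i < (ucs.length : Int) ∧ pvLvl ucs i > parent_level then
      pvAltLoopGo ucs label_to_reqs fuel parent_level
        (pvSkipGo ucs (pvLvl ucs i) (2 * ucs.length) (i + 1))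
        (PySem.Set.union reqs (pvAltGo ucs label_to_reqs fuel i))
    else reqs
end

def get_all_reqs_alt (ucs : List (String × String × Int)) (index : Int) (label_to_reqs : List (String × List String)) : List String :=
  pvAltGo ucs label_to_reqs (4 * ucs.length + 2) index

-- ===== PRECONDITION & SPEC =====
-- Pre_ excludes exactly the indices out of Python's range, where A raises IndexError.
def Pre_get_all_reqs (ucs : List (String × String × Int)) (index : Int) (label_to_reqs : List (String × List String)) : Prop :=
  PySem.Raise.InRange ucs.length index
instance (ucs : List (String × String × Int)) (index : Int) (label_to_reqs : List (String × List String)) : Decidable (Pre_get_all_reqs ucs index label_to_reqs) := by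
  unfold Pre_get_all_reqs PySem.Raise.InRange; infer_instance

def pvWitness_get_all_reqs : (List (String × String × Int)) × Int × (List (String × List String)) :=
  ([("UC1", "t", 0), ("UC1.1", "t", 1)], 0, [("UC1", ["r1"]), ("UC1.1", ["r2"])])

def Spec_get_all_reqs (ucs : List (String × String × Int)) (index : Int) (label_to_reqs : List (String × List String)) (out : List String) : Prop := out = get_all_reqs_alt ucs index label_to_reqs
instance (ucs : List (String × String × Int)) (index : Int) (label_to_reqs : List (String × List String)) (out : List String) : Decidable (Spec_get_all_reqs ucs index label_to_reqs out) := by unfold Spec_get_all_reqs; infer_instance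

-- ===== CLAIM (what is proved, stated in full; the proofs are below) =====
def Claim_equal_get_all_reqs : Prop := ∀ (ucs : List (String × String × Int)) (index : Int) (label_to_reqs : List (String × List String)), Dom_get_all_reqs ucs index label_to_reqs → Pre_get_all_reqs ucs index label_to_reqs → Spec_get_all_reqs ucs index label_to_reqs (get_all_reqs ucs index label_to_reqs)

-- ===== LEMMAS AND PROOFS =====

theorem pv_witness_ok :
    Dom_get_all_reqs pvWitness_get_all_reqs.1 pvWitness_get_all_reqs.2.1 pvWitness_get_all_reqs.2.2 ∧
    Pre_get_all_reqs pvWitness_get_all_reqs.1 pvWitness_get_all_reqs.2.1 pvWitness_get_all_reqs.2.2 := by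
  constructor
  · decide
  · unfold Pre_get_all_reqs pvWitness_get_all_reqs PySem.Raise.InRange; norm_num

-- requirements of entry i, as A and B both look them up
def pvReqsAt (ucs : List (String × String × Int)) (label_to_reqs : List (String × List String)) (i : Int) : List String :=
  (PySem.Dict.mk label_to_reqs).getD (((PySem.List.pyGet? ucs i).getD ("", "", 0)).1) []

-- fuel-free version of the inner while, for the proofs
def pvSkip (ucs : List (String × String × Int)) (child_level : Int) (i : Int) : Int :=
  if h : i < (ucs.length : Int) ∧ pvLvl ucs i > child_level then pvSkip ucs child_level (i + 1)
  else i
termination_by ((ucs.length : Int) - i).toNat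
decreasing_by omega

theorem pvSkip_ge (ucs : List (String × String × Int)) (child_level i : Int) :
    i ≤ pvSkip ucs child_level i := by
  induction i using pvSkip.induct ucs child_level with
  | case1 i h ih => rw [pvSkip, dif_pos h]; omega
  | case2 i h => rw [pvSkip, dif_neg h]

-- the canonical accumulator: walk i forward while pvLvl > parent_level, updating with each entry's reqs
def pvSpine (ucs : List (String × String × Int)) (label_to_reqs : List (String × List String)) (parent_level : Int) (i : Int) (r : PySem.Set String) : PySem.Set String :=
  if h : i < (ucs.length : Int) ∧ pvLvl ucs i > parent_level then
    pvSpine ucs label_to_reqs parent_level (i + 1) (PySem.Set.update r (pvReqsAt ucs label_to_reqs i))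
  else r
termination_by ((ucs.length : Int) - i).toNat
decreasing_by omega

-- one-step equations (rw-friendly)
theorem pvSpine_pos {ucs : List (String × String × Int)} {label_to_reqs : List (String × List String)} {parent_level i : Int} (r : PySem.Set String) (h : i < (ucs.length : Int) ∧ pvLvl ucs i > parent_level) :
    pvSpine ucs label_to_reqs parent_level i r =
    pvSpine ucs label_to_reqs parent_level (i + 1) (PySem.Set.update r (pvReqsAt ucs label_to_reqs i)) := by
  rw [pvSpine]; exact dif_pos h

theorem pvSpine_neg {ucs : List (String × String × Int)} {label_to_reqs : List (String × List String)} {parent_level i : Int} (r : PySem.Set String) (h : ¬ (i < (ucs.length : Int) ∧ pvLvl ucs i > parent_level)) :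
    pvSpine ucs label_to_reqs parent_level i r = r := by
  rw [pvSpine]; exact dif_neg h

theorem pvSkip_pos {ucs : List (String × String × Int)} {child_level i : Int} (h : i < (ucs.length : Int) ∧ pvLvl ucs i > child_level) :
    pvSkip ucs child_level i = pvSkip ucs child_level (i + 1) := by
  rw [pvSkip]; exact dif_pos h

theorem pvSkip_neg {ucs : List (String × String × Int)} {child_level i : Int} (h : ¬ (i < (ucs.length : Int) ∧ pvLvl ucs i > child_level)) :
    pvSkip ucs child_level i = i := by
  rw [pvSkip]; exact dif_neg h

-- the fuel-guarded inner while computes the fuel-free skip once the fuel covers the distance to the end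
theorem pvSkipGo_eq (ucs : List (String × String × Int)) (child_level : Int) :
    ∀ (fuel : Nat) (i : Int), ((ucs.length : Int) - i).toNat ≤ fuel →
      pvSkipGo ucs child_level fuel i = pvSkip ucs child_level i := by
  intro fuel
  induction fuel with
  | zero =>
    intro i hf
    rw [pvSkipGo, pvSkip_neg (by omega)]
  | succ fuel ih =>
    intro i hf
    rw [pvSkipGo]
    by_cases hc : i < (ucs.length : Int) ∧ pvLvl ucs i > child_level
    · rw [if_pos hc, pvSkip_pos hc]
      exact ih (i + 1) (by omega)
    · rw [if_neg hc, pvSkip_neg hc]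

theorem pv_get_some {ucs : List (String × String × Int)} {i : Int} (h1 : -(ucs.length : Int) ≤ i) (h2 : i < (ucs.length : Int)) :
    ∃ uc, PySem.List.pyGet? ucs i = some uc := by
  rcases h : PySem.List.pyGet? ucs i with _ | uc
  · exact absurd ((PySem.List.pyGet?_eq_none_iff ucs i).mp h)
      (not_not_intro ⟨by exact_mod_cast h1, by exact_mod_cast h2⟩)
  · exact ⟨uc, rfl⟩

theorem pv_update_add (r s : PySem.Set String) (x : String) :
    PySem.Set.update r (PySem.Set.add s x) = PySem.Set.add (PySem.Set.update r s) x := by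
  by_cases hx : x ∈ s
  · rw [PySem.Set.add_of_mem hx, PySem.Set.add_of_mem]
    exact (PySem.Set.mem_update r s x).mpr (Or.inr hx)
  · rw [PySem.Set.add_of_not_mem hx]
    unfold PySem.Set.update
    rw [List.foldl_append]
    rfl

theorem pv_update_update (xs : List String) (r s : PySem.Set String) :
    PySem.Set.update r (PySem.Set.update s xs) = PySem.Set.update (PySem.Set.update r s) xs := by
  induction xs generalizing s with
  | nil => rfl
  | cons x xs ih =>
    rw [PySem.Set.update_cons, PySem.Set.update_cons, ih, pv_update_add]

theorem pv_update_spine (ucs : List (String × String × Int)) (label_to_reqs : List (String × List String)) (parent_level : Int) (i : Int) (r s : PySem.Set String) :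
    PySem.Set.update r (pvSpine ucs label_to_reqs parent_level i s) =
    pvSpine ucs label_to_reqs parent_level i (PySem.Set.update r s) := by
  induction i, s using pvSpine.induct ucs label_to_reqs parent_level with
  | case1 i s h ih =>
    rw [pvSpine_pos s h, pvSpine_pos (PySem.Set.update r s) h, ih, pv_update_update]
  | case2 i s h =>
    rw [pvSpine_neg s h, pvSpine_neg (PySem.Set.update r s) h]

-- splitting the spine at a subtree: accumulating a child's whole subtree at level c (> parent)
-- and then continuing after it is the same as letting the parent-level spine walk through it
theorem pv_spine_split (ucs : List (String × String × Int)) (label_to_reqs : List (String × List String)) (parent_level c : Int) (hpc : parent_level < c) :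
    ∀ (m : Nat) (j : Int) (acc : PySem.Set String), ((ucs.length : Int) - j).toNat ≤ m →
      pvSpine ucs label_to_reqs parent_level j acc =
      pvSpine ucs label_to_reqs parent_level (pvSkip ucs c j) (pvSpine ucs label_to_reqs c j acc) := by
  intro m
  induction m with
  | zero =>
    intro j acc hm
    have hcond : ¬ (j < (ucs.length : Int) ∧ pvLvl ucs j > c) := by omega
    have hcond' : ¬ (j < (ucs.length : Int) ∧ pvLvl ucs j > parent_level) := by omega
    rw [pvSkip_neg hcond, pvSpine_neg acc hcond]
  | succ m ih =>
    intro j acc hm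
    by_cases hc : j < (ucs.length : Int) ∧ pvLvl ucs j > c
    · have hp : j < (ucs.length : Int) ∧ pvLvl ucs j > parent_level := ⟨hc.1, by omega⟩
      rw [pvSkip_pos hc, pvSpine_pos acc hc, pvSpine_pos acc hp]
      exact ih (j + 1) _ (by omega)
    · rw [pvSkip_neg hc, pvSpine_neg acc hc]

-- A's descendant fold, from any start > -len, equals the spine
theorem pv_a_fold (ucs : List (String × String × Int)) (label_to_reqs : List (String × List String)) (parent_level : Int) :
    ∀ (m : Nat) (start : Int) (r : PySem.Set String),
      ((ucs.length : Int) - start).toNat ≤ m → -(ucs.length : Int) < start →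
      List.foldl (fun reqs desc_idx =>
          match PySem.List.pyGet? ucs desc_idx with
          | none => reqs
          | some duc =>
            if (PySem.Dict.mk label_to_reqs).contains duc.1 then
              PySem.Set.update reqs ((PySem.Dict.mk label_to_reqs).getD duc.1 []) else reqs)
        r (pvGdLoop ucs parent_level (PySem.List.pyRange start (ucs.length : Int) 1)) =
      pvSpine ucs label_to_reqs parent_level start r := by
  intro m
  induction m with
  | zero =>
    intro start r hm hlo
    have hs : (ucs.length : Int) ≤ start := by omega
    rw [PySem.List.pyRange_one_eq_nil hs, pvSpine_neg r (by omega)]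
    rfl
  | succ m ih =>
    intro start r hm hlo
    by_cases hs : start < (ucs.length : Int)
    · rw [PySem.List.pyRange_one_cons hs]
      obtain ⟨uc, huc⟩ := pv_get_some (i := start) (by omega) hs
      have hlvl : pvLvl ucs start = uc.2.2 := by simp [pvLvl, huc]
      rw [pvGdLoop, huc]
      by_cases hgt : uc.2.2 > parent_level
      · simp only [hgt, if_true]
        rw [List.foldl_cons]
        have hbody : (match PySem.List.pyGet? ucs start with
            | none => r
            | some duc =>
              if (PySem.Dict.mk label_to_reqs).contains duc.1 then
                PySem.Set.update r ((PySem.Dict.mk label_to_reqs).getD duc.1 []) else r) =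
            PySem.Set.update r (pvReqsAt ucs label_to_reqs start) := by
          unfold pvReqsAt
          simp only [huc, Option.getD_some]
          rcases hcont : (PySem.Dict.mk label_to_reqs).contains uc.1 with _ | _
          · rw [PySem.Dict.getD_of_not_contains _ _ hcont]
            simp
          · simp
        rw [hbody, pvSpine_pos r ⟨hs, by omega⟩]
        exact ih (start + 1) _ (by omega) (by omega)
      · simp only [hgt, if_false]
        rw [pvSpine_neg r (by omega), List.foldl_nil]
    · rw [PySem.List.pyRange_one_eq_nil (by omega), pvSpine_neg r (by omega)]
      rfl

-- B's fuel-guarded recursion computes the spine once the fuel covers the walk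
theorem pv_b_go (ucs : List (String × String × Int)) (label_to_reqs : List (String × List String)) :
    ∀ (fuel : Nat),
      (∀ (parent_level i : Int) (r : PySem.Set String),
        2 * ((ucs.length : Int) - i).toNat + 1 ≤ fuel → -(ucs.length : Int) < i →
        pvAltLoopGo ucs label_to_reqs fuel parent_level i r = pvSpine ucs label_to_reqs parent_level i r) ∧
      (∀ (index : Int) (uc : String × String × Int),
        2 * ((ucs.length : Int) - index).toNat ≤ fuel → -(ucs.length : Int) ≤ index → index < (ucs.length : Int) →
        PySem.List.pyGet? ucs index = some uc →
        pvAltGo ucs label_to_reqs fuel index =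
          pvSpine ucs label_to_reqs uc.2.2 (index + 1)
            (PySem.Set.ofList ((PySem.Dict.mk label_to_reqs).getD uc.1 []))) := by
  intro fuel
  induction fuel with
  | zero =>
    constructor
    · intro parent_level i r hf hlo; omega
    · intro index uc hf h1 h2 huc; omega
  | succ fuel ih =>
    constructor
    · intro parent_level i r hf hlo
      rw [pvAltLoopGo]
      by_cases hc : i < (ucs.length : Int) ∧ pvLvl ucs i > parent_level
      · rw [if_pos hc]
        obtain ⟨uc, huc⟩ := pv_get_some (i := i) (by omega) hc.1
        have hlvl : pvLvl ucs i = uc.2.2 := by simp [pvLvl, huc]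
        have halt := ih.2 i uc (by omega) (by omega) hc.1 huc
        rw [halt]
        rw [pvSkipGo_eq ucs (pvLvl ucs i) (2 * ucs.length) (i + 1) (by omega)]
        rw [ih.1 parent_level (pvSkip ucs (pvLvl ucs i) (i + 1)) _
          (by have := pvSkip_ge ucs (pvLvl ucs i) (i + 1); omega)
          (by have := pvSkip_ge ucs (pvLvl ucs i) (i + 1); omega)]
        -- fold the union of the child's result back into a single spine accumulator
        have hunion : PySem.Set.union r
              (pvSpine ucs label_to_reqs uc.2.2 (i + 1)
                (PySem.Set.ofList ((PySem.Dict.mk label_to_reqs).getD uc.1 []))) =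
            pvSpine ucs label_to_reqs uc.2.2 (i + 1)
              (PySem.Set.update r (pvReqsAt ucs label_to_reqs i)) := by
          show PySem.Set.update r _ = _
          rw [← PySem.Set.update_nil_left, pv_update_spine, pv_update_update]
          unfold pvReqsAt
          simp only [huc, Option.getD_some]
          rfl
        rw [hunion, hlvl]
        rw [← pv_spine_split ucs label_to_reqs parent_level uc.2.2 (by omega)
          ((ucs.length : Int) - (i + 1)).toNat (i + 1) _ (by omega)]
        rw [pvSpine_pos r hc]
      · rw [if_neg hc, pvSpine_neg r hc]
    · intro index uc hf h1 h2 huc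
      rw [pvAltGo, huc]
      exact ih.1 uc.2.2 (index + 1) _ (by omega) (by omega)

-- ===== VERDICT (by name: the statement is the Claim_ definition above) =====
theorem get_all_reqs_spec : Claim_equal_get_all_reqs := by
  intro ucs index label_to_reqs _hdom hpre
  unfold Spec_get_all_reqs
  have hin : PySem.Raise.InRange ucs.length index := hpre
  unfold PySem.Raise.InRange at hin
  obtain ⟨uc, huc⟩ := pv_get_some (ucs := ucs) (i := index) (by omega) (by omega)
  rw [get_all_reqs, huc]
  simp only
  unfold get_descendants
  rw [huc]
  rw [pv_a_fold ucs label_to_reqs uc.2.2 ((ucs.length : Int) - (index + 1)).toNat (index + 1) _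
    (by omega) (by omega)]
  unfold get_all_reqs_alt
  rw [(pv_b_go ucs label_to_reqs (4 * ucs.length + 2)).2 index uc (by omega) (by omega) (by omega) huc]
  congr 1
  rw [← PySem.Set.update_nil_left]
  rcases hcont : (PySem.Dict.mk label_to_reqs).contains uc.1 with _ | _
  · rw [PySem.Dict.getD_of_not_contains _ _ hcont]
    simp
  · simp
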